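-- pv_equiv track=rewrite | github.com/MadhavendraSinghShaktawat/websocket-terminalui-sahayak-sih2k25 | client.py | _quiz_is_valid
-- ===== SOURCE A (Python) =====
-- def _quiz_is_valid(text: str) -> bool:
--     lines = [ln for ln in text.splitlines() if ln.strip()]
--     if len(lines) < 5:
--         return False
--     if not lines[0].startswith("Q:") or not lines[0].strip().endswith("?"):
--         return False
--     labels = ["A)", "B)", "C)", "D)"]
--     got = [any(ln.startswith(l) and len(ln) > len(l) + 1 for ln in lines[1:]) for l in labels]
--     return all(got)
-- ===== SOURCE B (Python) =====
-- def _quiz_is_valid(text: str) -> bool: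
--     lines = [ln for ln in text.splitlines() if ln.strip()]
--     if len(lines) < 5:
--         return False
--     if not lines[0].startswith("Q:") or not lines[0].strip().endswith("?"):
--         return False
--     seen = {ln[:2] for ln in lines[1:] if len(ln) > 3}
--     return {"A)", "B)", "C)", "D)"}.issubset(seen)
-- ===== Notes on version B (the rewrite author's own statement) =====
-- stated objective: simpler
-- what changed: Instead of scanning lines[1:] once per option label with any(startswith(...)), B extracts each line's 2-character prefix ln[:2] once into a set (guarded by len(ln) > 3) and checks that the four option labels form a subset of it; correct because every label is exactly 2 characters, so startswith is a prefix-slice equality and the per-label length guard is len(ln) > 3 in all four cases.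
import Mathlib
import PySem

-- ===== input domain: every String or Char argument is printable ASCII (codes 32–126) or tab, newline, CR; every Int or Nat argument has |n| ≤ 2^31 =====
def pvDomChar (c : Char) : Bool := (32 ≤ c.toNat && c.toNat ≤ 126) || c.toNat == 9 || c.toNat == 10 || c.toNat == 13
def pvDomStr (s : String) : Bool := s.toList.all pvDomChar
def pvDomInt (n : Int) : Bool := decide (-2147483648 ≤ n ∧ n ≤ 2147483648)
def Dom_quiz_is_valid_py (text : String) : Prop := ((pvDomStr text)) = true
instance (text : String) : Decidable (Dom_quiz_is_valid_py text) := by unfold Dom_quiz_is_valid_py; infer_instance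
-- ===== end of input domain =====

-- B drops A's per-label any()-scans entirely: it extracts each line's 2-char prefix ln[:2] once
-- into a set and checks {"A)","B)","C)","D)"} ⊆ seen (alternative decomposition, same cost class).

-- ===== PORT A =====
def quiz_is_valid_py (text : String) : Bool :=
  let lines := (PySem.Str.splitlines text).filter (fun ln => !(PySem.Str.strip ln == ""))
  if lines.length < 5 then false
  else if !(PySem.Str.startswith lines[0]! "Q:") || !(PySem.Str.endswith (PySem.Str.strip lines[0]!) "?") then false
  else
    let labels := ["A)", "B)", "C)", "D)"]
    let got := labels.map (fun l =>
      (PySem.List.slice lines (some 1) none).any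
        (fun ln => PySem.Str.startswith ln l && decide (PySem.Str.len ln > PySem.Str.len l + 1)))
    got.all id

-- ===== PORT B =====
def quiz_is_valid_py_alt (text : String) : Bool :=
  let lines := (PySem.Str.splitlines text).filter (fun ln => !(PySem.Str.strip ln == ""))
  if lines.length < 5 then false
  else if !(PySem.Str.startswith lines[0]! "Q:") || !(PySem.Str.endswith (PySem.Str.strip lines[0]!) "?") then false
  else
    -- seen = {ln[:2] for ln in lines[1:] if len(ln) > 3}
    let seen : PySem.Set String := (lines.drop 1).foldl
      (fun acc ln => if 3 < PySem.Str.len ln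
        then PySem.Set.add acc (PySem.Str.slice ln none (some 2)) else acc)
      PySem.Set.empty
    PySem.Set.issubset (PySem.Set.ofList ["A)", "B)", "C)", "D)"]) seen

-- ===== PRECONDITION & SPEC =====
def Spec_quiz_is_valid_py (text : String) (out : Bool) : Prop := out = quiz_is_valid_py_alt text
instance (text : String) (out : Bool) : Decidable (Spec_quiz_is_valid_py text out) := by unfold Spec_quiz_is_valid_py; infer_instance

-- ===== CLAIM =====
def Claim_equal_quiz_is_valid_py : Prop := ∀ (text : String), Dom_quiz_is_valid_py text → Spec_quiz_is_valid_py text (quiz_is_valid_py text)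

-- ===== LEMMAS AND PROOFS =====

-- B's fold characterised: a string is in the accumulated prefix set iff it was there or
-- some line is long enough and has it as its 2-char slice
lemma quiz_seen_mem (rest : List String) (acc : PySem.Set String) (lab : String) :
    lab ∈ rest.foldl (fun acc ln => if 3 < PySem.Str.len ln
        then PySem.Set.add acc (PySem.Str.slice ln none (some 2)) else acc) acc ↔
      lab ∈ acc ∨ ∃ ln ∈ rest, 3 < PySem.Str.len ln ∧ PySem.Str.slice ln none (some 2) = lab := by
  induction rest generalizing acc with
  | nil => simp
  | cons ln rest ih =>
      simp only [List.foldl_cons, List.exists_mem_cons_iff]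
      split_ifs with h
      · rw [ih]; simp only [PySem.Set.mem_add, h, eq_comm]; tauto
      · rw [ih]; tauto

-- A's per-line test for one 2-char label equals B's slice condition
lemma quiz_hit (ln lab : String) (hlab : lab.toList.length = 2) :
    (PySem.Str.startswith ln lab && decide (PySem.Str.len ln > PySem.Str.len lab + 1)) = true ↔
      3 < PySem.Str.len ln ∧ PySem.Str.slice ln none (some 2) = lab := by
  have hlen : PySem.Str.len lab = 2 := by simp [PySem.Str.len, hlab]
  have hsl : PySem.Str.slice ln none (some 2) = String.ofList (ln.toList.take 2) := by
    simp [PySem.Str.slice, PySem.Chars.slice, PySem.List.slice_to ln.toList (by norm_num : (0:Int) ≤ 2)]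
  rw [hsl, hlen]
  constructor
  · rintro h
    simp only [Bool.and_eq_true, decide_eq_true_eq] at h
    obtain ⟨hsw, hgt⟩ := h
    refine ⟨by omega, ?_⟩
    have hp : lab.toList <+: ln.toList := by
      simpa [PySem.Str.startswith, PySem.Chars.startswith, List.isPrefixOf_iff_prefix] using hsw
    rw [List.prefix_iff_eq_take, hlab] at hp
    rw [← hp]
    simp
  · rintro ⟨hgt, heq⟩
    have htake : ln.toList.take 2 = lab.toList := by
      have := congrArg String.toList heq
      simpa using this
    simp only [Bool.and_eq_true, decide_eq_true_eq]
    refine ⟨?_, by omega⟩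
    simp only [PySem.Str.startswith, PySem.Chars.startswith, List.isPrefixOf_iff_prefix,
      List.prefix_iff_eq_take, hlab]
    exact htake.symm

-- pointwise bridge: A's any-scan for one label equals membership in B's prefix set
lemma quiz_point (rest : List String) (lab : String) (hlab : lab.toList.length = 2) :
    (rest.any fun ln => PySem.Str.startswith ln lab && decide (PySem.Str.len ln > PySem.Str.len lab + 1)) =
    PySem.Set.contains (rest.foldl (fun acc ln => if 3 < PySem.Str.len ln
        then PySem.Set.add acc (PySem.Str.slice ln none (some 2)) else acc) PySem.Set.empty) lab := by
  rw [Bool.eq_iff_iff, List.any_eq_true, PySem.Set.contains_iff, quiz_seen_mem]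
  simp only [PySem.Set.empty, List.not_mem_nil, false_or]
  constructor
  · rintro ⟨ln, hln, hh⟩; exact ⟨ln, hln, (quiz_hit ln lab hlab).mp hh⟩
  · rintro ⟨ln, hln, hh⟩; exact ⟨ln, hln, (quiz_hit ln lab hlab).mpr hh⟩

-- ===== VERDICT =====
theorem quiz_is_valid_py_spec : Claim_equal_quiz_is_valid_py := by
  intro text _
  unfold Spec_quiz_is_valid_py quiz_is_valid_py quiz_is_valid_py_alt
  simp only []
  split_ifs with h1 h2
  · rfl
  · rfl
  · have hsl : PySem.List.slice ((PySem.Str.splitlines text).filter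
        (fun ln => !(PySem.Str.strip ln == ""))) (some 1) none =
        ((PySem.Str.splitlines text).filter (fun ln => !(PySem.Str.strip ln == ""))).drop 1 := by
      simpa using PySem.List.slice_from_natCast
        ((PySem.Str.splitlines text).filter (fun ln => !(PySem.Str.strip ln == ""))) 1
    rw [hsl]
    have hof : PySem.Set.ofList ["A)", "B)", "C)", "D)"] = ["A)", "B)", "C)", "D)"] := by decide
    rw [PySem.Set.issubset, hof, List.all_map]
    simp only [List.all_cons, List.all_nil, Function.comp, id]
    rw [quiz_point _ "A)" (by decide), quiz_point _ "B)" (by decide),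
        quiz_point _ "C)" (by decide), quiz_point _ "D)" (by decide)]
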